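-- pv_equiv track=rewrite | github.com/Agent-on-the-Fly/Memento-S | core/evolve/dataset.py | iter_tasks
-- ===== SOURCE A (Python) =====
-- from typing import Any
--
-- def iter_tasks(tasks: list[dict[str, Any]], start: int, end: int | None, limit: int | None):
--     yielded = 0
--     for idx, task in enumerate(tasks):
--         if idx < start:
--             continue
--         if end is not None and idx > end:
--             break
--         if limit is not None and yielded >= limit:
--             break
--         yielded += 1
--         yield idx, task
-- ===== SOURCE B (Python) =====
-- def iter_tasks(tasks, start, end, limit):
--     lo = max(start, 0)
--     hi = len(tasks) if end is None else min(end + 1, len(tasks))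
--     if limit is not None:
--         hi = min(hi, lo + max(limit, 0))
--     for idx in range(lo, hi):
--         yield idx, tasks[idx]
-- ===== Notes on version B (the rewrite author's own statement) =====
-- stated objective: simpler
-- what changed: A scans every index from 0, filtering with continue/break and an enumerate counter; B computes the iteration bounds up front (lo = max(start,0), hi clamped by end+1, len(tasks) and lo+max(limit,0)) and yields tasks[idx] directly over range(lo, hi) with no per-element tests.
import Mathlib
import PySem

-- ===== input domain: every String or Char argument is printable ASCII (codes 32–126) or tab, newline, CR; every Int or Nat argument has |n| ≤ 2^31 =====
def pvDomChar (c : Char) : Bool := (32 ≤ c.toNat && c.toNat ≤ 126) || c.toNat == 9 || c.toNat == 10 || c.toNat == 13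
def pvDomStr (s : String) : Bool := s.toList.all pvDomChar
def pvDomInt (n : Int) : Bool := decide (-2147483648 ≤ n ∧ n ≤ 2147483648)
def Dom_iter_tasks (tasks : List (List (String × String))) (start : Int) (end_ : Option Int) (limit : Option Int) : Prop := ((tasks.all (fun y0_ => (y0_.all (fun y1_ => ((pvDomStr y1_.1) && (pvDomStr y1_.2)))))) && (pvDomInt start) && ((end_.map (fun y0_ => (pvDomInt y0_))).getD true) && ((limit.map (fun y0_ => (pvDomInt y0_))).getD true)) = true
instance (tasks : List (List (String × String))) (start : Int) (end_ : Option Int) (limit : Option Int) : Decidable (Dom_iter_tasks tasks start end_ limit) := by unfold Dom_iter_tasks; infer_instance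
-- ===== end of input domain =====

-- B computes the iteration bounds up front and indexes directly over range(lo,hi), replacing A's scan-and-filter pass; objective: simpler.


-- ===== PORT A =====
-- A's loop over enumerate(tasks) with continue/break and the `yielded` counter.
def iterTasksLoopA (start : Int) (end_ : Option Int) (limit : Option Int)
    (rest : List (List (String × String))) (idx yielded : Int) : List (Int × (List (String × String))) :=
  match rest with
  | [] => []
  | t :: r =>
    if idx < start then iterTasksLoopA start end_ limit r (idx + 1) yielded
    else if (match end_ with | some e => decide (e < idx) | none => false) then []
    else if (match limit with | some l => decide (l ≤ yielded) | none => false) then []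
    else (idx, t) :: iterTasksLoopA start end_ limit r (idx + 1) (yielded + 1)

def iter_tasks (tasks : List (List (String × String))) (start : Int) (end_ : Option Int) (limit : Option Int) : List (Int × (List (String × String))) :=
  iterTasksLoopA start end_ limit tasks 0 0

-- ===== PORT B =====
-- B: lo/hi computed up front, then a direct indexed pass over range(lo, hi).
def iter_tasks_alt (tasks : List (List (String × String))) (start : Int) (end_ : Option Int) (limit : Option Int) : List (Int × (List (String × String))) :=
  let lo : Int := max start 0
  let n : Int := tasks.length
  let hi0 : Int := match end_ with | none => n | some e => min (e + 1) n
  let hi : Int := match limit with | none => hi0 | some l => min hi0 (lo + max l 0)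
  (PySem.List.pyRange lo hi 1).filterMap
    (fun i => (PySem.List.pyGet? tasks i).map (fun t => (i, t)))

-- ===== PRECONDITION & SPEC =====
def Spec_iter_tasks (tasks : List (List (String × String))) (start : Int) (end_ : Option Int) (limit : Option Int) (out : List (Int × (List (String × String)))) : Prop := out = iter_tasks_alt tasks start end_ limit
instance (tasks : List (List (String × String))) (start : Int) (end_ : Option Int) (limit : Option Int) (out : List (Int × (List (String × String)))) : Decidable (Spec_iter_tasks tasks start end_ limit out) := by unfold Spec_iter_tasks; infer_instance

-- ===== CLAIM (what is proved, stated in full; the proofs are below) =====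
def Claim_equal_iter_tasks : Prop := ∀ (tasks : List (List (String × String))) (start : Int) (end_ : Option Int) (limit : Option Int), Dom_iter_tasks tasks start end_ limit → Spec_iter_tasks tasks start end_ limit (iter_tasks tasks start end_ limit)

-- ===== LEMMAS AND PROOFS =====

-- the upper bound A's loop effectively runs to, with `y` yields already made
def pvHiOf (end_ limit : Option Int) (n lo y : Int) : Int :=
  min (match end_ with | none => n | some e => min (e + 1) n)
      (match limit with | none => n | some l => lo + max (l - y) 0)

theorem pvPyGet?_cons_pos {α : Type} (x : α) (xs : List α) (i : Int) (h : 1 ≤ i) :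
    PySem.List.pyGet? (x :: xs) i = PySem.List.pyGet? xs (i - 1) := by
  rw [PySem.List.pyGet?_of_nonneg _ (by omega : (0:Int) ≤ i),
    PySem.List.pyGet?_of_nonneg _ (by omega : (0:Int) ≤ i - 1)]
  have hv : i.toNat = (i - 1).toNat + 1 := by omega
  rw [hv]
  simp

theorem pvLoopA_eq (start : Int) (end_ limit : Option Int) (rest : List (List (String × String))) :
    ∀ (idx y : Int),
      iterTasksLoopA start end_ limit rest idx y =
      (PySem.List.pyRange (max start idx) (pvHiOf end_ limit (idx + rest.length) (max start idx) y) 1).filterMap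
        (fun i => (PySem.List.pyGet? rest (i - idx)).map (fun t => (i, t))) := by
  induction rest with
  | nil =>
    intro idx y
    rw [PySem.List.pyRange_one_eq_nil]
    · rw [iterTasksLoopA.eq_def]; simp
    · simp only [pvHiOf, List.length_nil]
      cases end_ <;> cases limit <;> simp
  | cons t r ih =>
    intro idx y
    rw [iterTasksLoopA.eq_def]; simp only []
    by_cases h1 : idx < start
    · -- continue branch: idx < start
      rw [if_pos h1, ih (idx + 1) y]
      have hmax : max start (idx + 1) = max start idx := by omega
      have hlen : (idx + 1) + (r.length : Int) = idx + ((t :: r).length : Int) := by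
        simp; omega
      rw [hmax, hlen]
      apply List.filterMap_congr
      intro i hi
      have hib := (PySem.List.mem_pyRange_one).1 hi
      rw [pvPyGet?_cons_pos _ _ _ (by omega : 1 ≤ i - idx)]
      have e1 : i - idx - 1 = i - (idx + 1) := by omega
      rw [e1]
    · rw [if_neg h1]
      have hlo : max start idx = idx := by omega
      cases hb2 : (match end_ with | some e => decide (e < idx) | none => false) with
      | true =>
        -- break: idx past end
        rw [if_pos (rfl : true = true), PySem.List.pyRange_one_eq_nil]
        · simp
        · cases end_ with
          | none => simp at hb2
          | some e =>
            simp at hb2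
            simp only [pvHiOf]
            cases limit <;> simp <;> omega
      | false =>
        rw [if_neg (by simp : ¬ false = true)]
        cases hb3 : (match limit with | some l => decide (l ≤ y) | none => false) with
        | true =>
          -- break: limit reached
          rw [if_pos (rfl : true = true), PySem.List.pyRange_one_eq_nil]
          · simp
          · cases limit with
            | none => simp at hb3
            | some l =>
              simp at hb3
              simp only [pvHiOf]
              cases end_ <;> simp <;> omega
        | false =>
          -- yield branch
          rw [if_neg (by simp : ¬ false = true)]
          have hlt : idx < pvHiOf end_ limit (idx + ((t :: r).length : Int)) (max start idx) y := by
            simp only [pvHiOf, hlo, List.length_cons]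
            cases end_ <;> cases limit <;> simp at hb2 hb3 ⊢ <;> omega
          rw [PySem.List.pyRange_one_cons (by omega : max start idx < _)]
          rw [List.filterMap_cons]
          have h0 : PySem.List.pyGet? (t :: r) (max start idx - idx) = some t := by
            rw [hlo]; simp
          rw [h0]
          simp only [Option.map_some]
          rw [hlo, ih (idx + 1) (y + 1)]
          have hmax1 : max start (idx + 1) = idx + 1 := by omega
          have hhi : pvHiOf end_ limit (idx + ((t :: r).length : Int)) idx y
              = pvHiOf end_ limit ((idx + 1) + (r.length : Int)) (max start (idx + 1)) (y + 1) := by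
            simp only [pvHiOf, hmax1, List.length_cons]
            cases end_ <;> cases limit <;> simp at hb2 hb3 ⊢ <;> omega
          rw [hhi, hmax1]
          congr 1
          apply List.filterMap_congr
          intro i hi
          have hib := (PySem.List.mem_pyRange_one).1 hi
          rw [pvPyGet?_cons_pos _ _ _ (by omega : 1 ≤ i - idx)]
          have e1 : i - idx - 1 = i - (idx + 1) := by omega
          rw [e1]

theorem pvAlt_eq (tasks : List (List (String × String))) (start : Int) (end_ limit : Option Int) :
    iter_tasks_alt tasks start end_ limit =
    (PySem.List.pyRange (max start 0) (pvHiOf end_ limit (0 + (tasks.length : Int)) (max start 0) 0) 1).filterMap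
      (fun i => (PySem.List.pyGet? tasks (i - 0)).map (fun t => (i, t))) := by
  unfold iter_tasks_alt
  simp only [sub_zero]
  congr 1
  simp only [pvHiOf]
  cases end_ <;> cases limit <;> simp

-- ===== VERDICT (by name: the statement is the Claim_ definition above) =====
theorem iter_tasks_spec : Claim_equal_iter_tasks := by
  intro tasks start end_ limit _
  unfold Spec_iter_tasks iter_tasks
  rw [pvLoopA_eq, pvAlt_eq]
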